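-- pv_equiv track=rewrite | github.com/sntimmons/recon-kit | audit/summary/sanity_checks.py | _bucket_hire_date
-- ===== SOURCE A (Python) =====
-- _HIRE_DATE_BUCKETS: list[tuple[str, int, int | None]] = [
--     ("1-7",              1,    7),
--     ("8-30",             8,   30),
--     ("31-180",          31,  180),
--     ("181-365",        181,  365),
--     ("366-1095 (1-3yr)", 366, 1095),
--     ("1096+ (3yr+)",  1096,  None),          # None = unbounded
-- ]
--
-- def _bucket_hire_date(abs_days: int) -> str | None:
--     for label, lo, hi in _HIRE_DATE_BUCKETS:
--         if hi is None:
--             if abs_days >= lo: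
--                 return label
--         elif lo <= abs_days <= hi:
--             return label
--     return None
-- ===== SOURCE B (Python) =====
-- import bisect
--
-- _BOUNDARIES = [1, 8, 31, 181, 366, 1096]
-- _LABELS = [None, "1-7", "8-30", "31-180", "181-365", "366-1095 (1-3yr)", "1096+ (3yr+)"]
--
-- def _bucket_hire_date(abs_days: int) -> str | None:
--     return _LABELS[bisect.bisect_right(_BOUNDARIES, abs_days)]
-- ===== Notes on version B (the rewrite author's own statement) =====
-- stated objective: idiomatic
-- what changed: Replaces the sequential per-bucket range-check loop with a precomputed sorted boundary table indexed via bisect_right (binary search), with a parallel label list covering the below-range and unbounded-top cases.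
import Mathlib
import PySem

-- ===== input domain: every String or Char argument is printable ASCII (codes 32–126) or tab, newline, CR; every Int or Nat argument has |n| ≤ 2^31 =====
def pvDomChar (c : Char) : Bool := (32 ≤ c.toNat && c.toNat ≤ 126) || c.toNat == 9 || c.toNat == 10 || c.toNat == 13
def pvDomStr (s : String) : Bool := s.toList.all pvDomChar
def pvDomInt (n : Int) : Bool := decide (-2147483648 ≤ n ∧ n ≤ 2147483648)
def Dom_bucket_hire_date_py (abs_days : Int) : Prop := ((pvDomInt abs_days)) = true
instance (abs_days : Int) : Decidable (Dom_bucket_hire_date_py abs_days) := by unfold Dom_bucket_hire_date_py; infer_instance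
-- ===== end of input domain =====

-- B replaces A's sequential per-bucket range-check loop by a sorted boundary table
-- indexed with bisect_right (objective: idiomatic); same return value everywhere.

-- ===== PORT A =====
def pvHireDateBuckets : List (String × Int × Option Int) :=
  [("1-7", 1, some 7), ("8-30", 8, some 30), ("31-180", 31, some 180),
   ("181-365", 181, some 365), ("366-1095 (1-3yr)", 366, some 1095),
   ("1096+ (3yr+)", 1096, none)]

-- the for-loop with early return, as structural recursion over the bucket list
def pvBucketLoop (abs_days : Int) : List (String × Int × Option Int) → Option String
  | [] => none
  | (label, lo, hi) :: rest =>
    match hi with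
    | none => if abs_days ≥ lo then some label else pvBucketLoop abs_days rest
    | some h => if lo ≤ abs_days ∧ abs_days ≤ h then some label else pvBucketLoop abs_days rest

def bucket_hire_date_py (abs_days : Int) : Option String :=
  pvBucketLoop abs_days pvHireDateBuckets

-- ===== PORT B =====
def pvBoundaries : List Int := [1, 8, 31, 181, 366, 1096]
def pvLabels : List (Option String) :=
  [none, some "1-7", some "8-30", some "31-180", some "181-365",
   some "366-1095 (1-3yr)", some "1096+ (3yr+)"]

-- bisect.bisect_right on a sorted list = number of elements ≤ x (its Lean counterpart)
def pvBisectRight (xs : List Int) (x : Int) : Nat := xs.countP (fun b => decide (b ≤ x))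

def bucket_hire_date_py_alt (abs_days : Int) : Option String :=
  pvLabels.getD (pvBisectRight pvBoundaries abs_days) none

-- ===== PRECONDITION & SPEC =====
def Spec_bucket_hire_date_py (abs_days : Int) (out : Option String) : Prop := out = bucket_hire_date_py_alt abs_days
instance (abs_days : Int) (out : Option String) : Decidable (Spec_bucket_hire_date_py abs_days out) := by unfold Spec_bucket_hire_date_py; infer_instance

-- ===== CLAIM (what is proved, stated in full; the proofs are below) =====
def Claim_equal_bucket_hire_date_py : Prop := ∀ (abs_days : Int), Dom_bucket_hire_date_py abs_days → Spec_bucket_hire_date_py abs_days (bucket_hire_date_py abs_days)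

-- ===== LEMMAS AND PROOFS =====

-- ===== VERDICT (by name: the statement is the Claim_ definition above) =====
theorem bucket_hire_date_py_spec : Claim_equal_bucket_hire_date_py := by
  intro d _
  unfold Spec_bucket_hire_date_py bucket_hire_date_py bucket_hire_date_py_alt
  have hc : (d < 1) ∨ (1 ≤ d ∧ d ≤ 7) ∨ (8 ≤ d ∧ d ≤ 30) ∨ (31 ≤ d ∧ d ≤ 180) ∨ (181 ≤ d ∧ d ≤ 365) ∨ (366 ≤ d ∧ d ≤ 1095) ∨ (1096 ≤ d) := by omega
  simp only [pvHireDateBuckets, pvBucketLoop, pvBisectRight, pvBoundaries, pvLabels]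
  rcases hc with h|h|h|h|h|h|h
  · simp [show ¬ (1:Int) ≤ d by omega, show ¬ (8:Int) ≤ d by omega, show ¬ (31:Int) ≤ d by omega, show ¬ (181:Int) ≤ d by omega, show ¬ (366:Int) ≤ d by omega, show ¬ (1096:Int) ≤ d by omega]
  · simp [show (1:Int) ≤ d by omega, show d ≤ 7 by omega, show ¬ (8:Int) ≤ d by omega, show ¬ (31:Int) ≤ d by omega, show ¬ (181:Int) ≤ d by omega, show ¬ (366:Int) ≤ d by omega, show ¬ (1096:Int) ≤ d by omega]
  · simp [show (1:Int) ≤ d by omega, show ¬ d ≤ 7 by omega, show (8:Int) ≤ d by omega, show d ≤ 30 by omega, show ¬ (31:Int) ≤ d by omega, show ¬ (181:Int) ≤ d by omega, show ¬ (366:Int) ≤ d by omega, show ¬ (1096:Int) ≤ d by omega]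
  · simp [show (1:Int) ≤ d by omega, show ¬ d ≤ 7 by omega, show (8:Int) ≤ d by omega, show ¬ d ≤ 30 by omega, show (31:Int) ≤ d by omega, show d ≤ 180 by omega, show ¬ (181:Int) ≤ d by omega, show ¬ (366:Int) ≤ d by omega, show ¬ (1096:Int) ≤ d by omega]
  · simp [show (1:Int) ≤ d by omega, show ¬ d ≤ 7 by omega, show (8:Int) ≤ d by omega, show ¬ d ≤ 30 by omega, show (31:Int) ≤ d by omega, show ¬ d ≤ 180 by omega, show (181:Int) ≤ d by omega, show d ≤ 365 by omega, show ¬ (366:Int) ≤ d by omega, show ¬ (1096:Int) ≤ d by omega]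
  · simp [show (1:Int) ≤ d by omega, show ¬ d ≤ 7 by omega, show (8:Int) ≤ d by omega, show ¬ d ≤ 30 by omega, show (31:Int) ≤ d by omega, show ¬ d ≤ 180 by omega, show (181:Int) ≤ d by omega, show ¬ d ≤ 365 by omega, show (366:Int) ≤ d by omega, show d ≤ 1095 by omega, show ¬ (1096:Int) ≤ d by omega]
  · simp [show (1:Int) ≤ d by omega, show ¬ d ≤ 7 by omega, show (8:Int) ≤ d by omega, show ¬ d ≤ 30 by omega, show (31:Int) ≤ d by omega, show ¬ d ≤ 180 by omega, show (181:Int) ≤ d by omega, show ¬ d ≤ 365 by omega, show (366:Int) ≤ d by omega, show ¬ d ≤ 1095 by omega, show (1096:Int) ≤ d by omega]
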